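-- pv_equiv track=rewrite | github.com/Tokyo113/leetcode_python | 中级班/chapter04/code_04_maxAbsBetweenArray.py | maxAbs1
-- ===== SOURCE A (Python) =====
-- def maxAbs1(arr):
--     if len(arr) <= 1:
--         return 0
--     if len(arr) == 2:
--         return abs(arr[0]-arr[1])
--     res = float('-inf')
--     for i in range(1, len(arr)):
--         ans = abs(max(arr[:i])-max(arr[i:]))
--         res = max(ans, res)
--
--     return res
-- ===== SOURCE B (Python) =====
-- def maxAbs1(arr):
--     if len(arr) <= 1:
--         return 0
--     return max(arr) - min(arr[0], arr[-1])
-- ===== Notes on version B (the rewrite author's own statement) =====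
-- stated objective: faster
-- what changed: replaces the quadratic scan over all split points (recomputing max of both slices per split) with the closed form max(arr) - min(arr[0], arr[-1])
import Mathlib
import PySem

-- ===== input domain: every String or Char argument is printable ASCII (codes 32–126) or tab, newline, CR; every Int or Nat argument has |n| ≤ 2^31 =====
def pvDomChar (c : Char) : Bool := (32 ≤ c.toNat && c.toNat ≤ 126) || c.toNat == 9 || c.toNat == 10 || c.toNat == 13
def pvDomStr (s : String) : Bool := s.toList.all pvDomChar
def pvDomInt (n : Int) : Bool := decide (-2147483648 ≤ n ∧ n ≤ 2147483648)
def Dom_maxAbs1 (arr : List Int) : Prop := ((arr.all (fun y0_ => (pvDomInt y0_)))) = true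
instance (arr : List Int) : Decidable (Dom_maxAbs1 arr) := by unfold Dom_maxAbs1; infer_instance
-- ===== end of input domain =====

-- B replaces A's quadratic scan over all split points by the closed form max(arr) - min(arr[0], arr[-1]) (objective: faster).

-- ===== PORT A =====
-- literal transliteration of A: the for-loop over range(1, len(arr)) is the fold maxAbs1Loop;
-- res = float('-inf') is the Option Int state `none` (the first max(ans, res) yields ans).
def maxAbs1Loop (arr : List Int) (l : List Int) (res : Option Int) : Option Int :=
  l.foldl
    (fun res i =>
      let ans : Int :=
        |(PySem.List.max? (PySem.List.slice arr none (some i)) (fun y => y)).getD 0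
          - (PySem.List.max? (PySem.List.slice arr (some i) none) (fun y => y)).getD 0|
      some (match res with
            | none => ans
            | some r => max ans r))
    res

def maxAbs1 (arr : List Int) : Int :=
  if arr.length ≤ 1 then 0
  else if arr.length = 2 then
    |PySem.List.pyGetD arr 0 0 - PySem.List.pyGetD arr 1 0|
  else
    (maxAbs1Loop arr (PySem.List.pyRange 1 (arr.length : Int) 1) none).getD 0

-- ===== PORT B =====
def maxAbs1_alt (arr : List Int) : Int :=
  if arr.length ≤ 1 then 0
  else (PySem.List.max? arr (fun y => y)).getD 0
        - min (PySem.List.pyGetD arr 0 0) (PySem.List.pyGetD arr (-1) 0)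

-- ===== PRECONDITION & SPEC =====
def Spec_maxAbs1 (arr : List Int) (out : Int) : Prop := out = maxAbs1_alt arr
instance (arr : List Int) (out : Int) : Decidable (Spec_maxAbs1 arr out) := by unfold Spec_maxAbs1; infer_instance

-- ===== CLAIM (what is proved, stated in full; the proofs are below) =====
def Claim_equal_maxAbs1 : Prop := ∀ (arr : List Int), Dom_maxAbs1 arr → Spec_maxAbs1 arr (maxAbs1 arr)

-- ===== LEMMAS AND PROOFS =====

-- max of a nonempty Python list, as both ports compute it
def pvMx (u : List Int) : Int := (PySem.List.max? u (fun y => y)).getD 0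

-- the `ans` of A's loop at split point i
def pvAns (arr : List Int) (i : Int) : Int :=
  |pvMx (PySem.List.slice arr none (some i)) - pvMx (PySem.List.slice arr (some i) none)|

theorem pvMx_cons (x : Int) (t : List Int) : pvMx (x :: t) = t.foldl max x := by
  simp [pvMx, PySem.List.max?_id_cons]

theorem pv_abs_eq (a b : Int) : |a - b| = max a b - min a b := by
  rcases le_total a b with h | h
  · rw [abs_of_nonpos (by omega), max_eq_right h, min_eq_left h]; ring
  · rw [abs_of_nonneg (by omega), max_eq_left h, min_eq_right h]

theorem pv_foldl_max_out (w : List Int) (x b : Int) :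
    List.foldl max (max x b) w = max x (List.foldl max b w) := by
  induction w generalizing b with
  | nil => rfl
  | cons c w ih => simp only [List.foldl, max_assoc, ih]

theorem pvMx_append (u v : List Int) (hu : u ≠ []) (hv : v ≠ []) :
    pvMx (u ++ v) = max (pvMx u) (pvMx v) := by
  obtain ⟨y, s, rfl⟩ := List.exists_cons_of_ne_nil hu
  obtain ⟨b, w, rfl⟩ := List.exists_cons_of_ne_nil hv
  simp only [pvMx_cons, List.cons_append]
  rw [show (s ++ b :: w).foldl max y = (b :: w).foldl max (s.foldl max y) from
    List.foldl_append]
  simpa using pv_foldl_max_out w (s.foldl max y) b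

theorem pv_le_pvMx (u : List Int) (x : Int) (hx : x ∈ u) : x ≤ pvMx u := by
  obtain ⟨y, s, rfl⟩ := List.exists_cons_of_ne_nil (List.ne_nil_of_mem hx)
  rw [pvMx_cons]
  rcases List.mem_cons.mp hx with rfl | hs
  · exact (PySem.List.le_foldl_max s x).1
  · exact (PySem.List.le_foldl_max s y).2 x hs

-- characterisation of A's running-max fold
theorem pv_foldl_char (f : Int → Int) (l : List Int) (r : Int) :
    (l.foldl (fun r i => max (f i) r) r = r ∨
      ∃ i ∈ l, l.foldl (fun r i => max (f i) r) r = f i) ∧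
    (r ≤ l.foldl (fun r i => max (f i) r) r ∧
      ∀ i ∈ l, f i ≤ l.foldl (fun r i => max (f i) r) r) := by
  induction l generalizing r with
  | nil => simp
  | cons x l ih =>
    obtain ⟨hmem, hlo, hub⟩ := ih (max (f x) r)
    refine ⟨?_, le_trans (le_max_right _ _) hlo, ?_⟩
    · rcases hmem with h | ⟨i, hi, hh⟩
      · rcases le_total (f x) r with hc | hc
        · left; simpa [List.foldl, max_eq_right hc] using h
        · right; exact ⟨x, List.mem_cons_self, by simpa [List.foldl, max_eq_left hc] using h⟩
      · right; exact ⟨i, List.mem_cons_of_mem _ hi, hh⟩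
    · intro i hi
      rcases List.mem_cons.mp hi with rfl | hi
      · exact le_trans (le_max_left _ _) hlo
      · exact hub i hi

theorem pv_foldl_opt (f : Int → Int) (l : List Int) (r : Int) :
    l.foldl
      (fun res i =>
        some (match res with
              | none => f i
              | some r => max (f i) r))
      (some r)
    = some (l.foldl (fun r i => max (f i) r) r) := by
  induction l generalizing r with
  | nil => rfl
  | cons x l ih => simpa [List.foldl] using ih (max (f x) r)

theorem maxAbs1Loop_eq (arr l : List Int) (r : Int) :
    maxAbs1Loop arr l (some r)
      = some (l.foldl (fun r i => max (pvAns arr i) r) r) :=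
  pv_foldl_opt (pvAns arr) l r

theorem maxAbs1Loop_none (arr : List Int) (x : Int) (l : List Int) :
    maxAbs1Loop arr (x :: l) none = maxAbs1Loop arr l (some (pvAns arr x)) := rfl

-- every split's ans is at most max(arr) - min(arr[0], arr[-1])
theorem pv_bound (a : Int) (t : List Int) (i : Int)
    (h1 : 1 ≤ i) (h2 : i < ((a :: t).length : Int)) :
    pvAns (a :: t) i ≤ pvMx (a :: t) - min a ((a :: t).getLast (by simp)) := by
  have hlen : (a :: t).length = t.length + 1 := by simp
  have h0 : (0 : Int) ≤ i := by omega
  have hit1 : 1 ≤ i.toNat := by omega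
  have hit2 : i.toNat < (a :: t).length := by omega
  rw [pvAns, PySem.List.slice_to _ h0, PySem.List.slice_from _ h0]
  set u := (a :: t).take i.toNat with hu_def
  set v := (a :: t).drop i.toNat with hv_def
  have hu : u ≠ [] := by
    rw [hu_def]; intro hcon
    rcases List.take_eq_nil_iff.mp hcon with h | h
    · omega
    · simp at h
  have hv : v ≠ [] := by
    rw [hv_def]; intro hcon
    have := List.drop_eq_nil_iff.mp hcon
    omega
  have huv : u ++ v = a :: t := List.take_append_drop _ _
  have e1 : pvMx (a :: t) = max (pvMx u) (pvMx v) := by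
    have := pvMx_append u v hu hv
    rw [huv] at this; exact this
  have ha : a ∈ u := by
    rw [hu_def, show i.toNat = (i.toNat - 1) + 1 from by omega, List.take_succ_cons]
    exact List.mem_cons_self
  have hL : (a :: t).getLast (by simp) ∈ v := by
    have : v.getLast hv = (a :: t).getLast (by simp) :=
      List.getLast_drop (by omega)
    rw [← this]; exact List.getLast_mem hv
  have e2 : a ≤ pvMx u := pv_le_pvMx u a ha
  have e3 : (a :: t).getLast (by simp) ≤ pvMx v := pv_le_pvMx v _ hL
  rw [pv_abs_eq, e1]
  have hm : min a ((a :: t).getLast (by simp)) ≤ min (pvMx u) (pvMx v) :=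
    le_min (le_trans (min_le_left _ _) e2) (le_trans (min_le_right _ _) e3)
  omega

-- the bound is attained at split i = 1 when arr[0] ≤ arr[-1]
theorem pv_att_low (a : Int) (t : List Int) (ht : t ≠ [])
    (hle : a ≤ (a :: t).getLast (by simp)) :
    pvAns (a :: t) 1 = pvMx (a :: t) - min a ((a :: t).getLast (by simp)) := by
  have hsl1 : PySem.List.slice (a :: t) none (some 1) = [a] := by
    rw [PySem.List.slice_to _ (by omega)]; rfl
  have hsl2 : PySem.List.slice (a :: t) (some 1) none = t := by
    rw [PySem.List.slice_from _ (by omega)]; rfl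
  have hlast : (a :: t).getLast (by simp) ∈ t := by
    rw [List.getLast_cons ht]; exact List.getLast_mem ht
  have e3 : (a :: t).getLast (by simp) ≤ pvMx t := pv_le_pvMx t _ hlast
  have h5 : a ≤ pvMx t := le_trans hle e3
  have e1 : pvMx (a :: t) = max (pvMx [a]) (pvMx t) := by
    have := pvMx_append [a] t (by simp) ht
    simpa using this
  rw [pvAns, hsl1, hsl2, pv_abs_eq, e1]
  have hma : pvMx [a] = a := by simp [pvMx_cons]
  rw [hma, min_eq_left h5, min_eq_left hle]

-- the bound is attained at split i = len-1 when arr[-1] ≤ arr[0]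
theorem pv_att_high (a : Int) (t : List Int) (ht : t ≠ [])
    (hge : (a :: t).getLast (by simp) ≤ a) :
    pvAns (a :: t) (((a :: t).length : Int) - 1)
      = pvMx (a :: t) - min a ((a :: t).getLast (by simp)) := by
  have hlen : (a :: t).length = t.length + 1 := by simp
  have hk : (((a :: t).length : Int) - 1).toNat = t.length := by omega
  have hsl1 : PySem.List.slice (a :: t) none (some (((a :: t).length : Int) - 1))
      = (a :: t).take t.length := by
    rw [PySem.List.slice_to _ (by omega), hk]
  have hsl2 : PySem.List.slice (a :: t) (some (((a :: t).length : Int) - 1)) none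
      = (a :: t).drop t.length := by
    rw [PySem.List.slice_from _ (by omega), hk]
  set u := (a :: t).take t.length with hu_def
  set v := (a :: t).drop t.length with hv_def
  have htlen : 1 ≤ t.length := by
    cases t with
    | nil => exact absurd rfl ht
    | cons _ _ => simp
  have hu : u ≠ [] := by
    rw [hu_def]; intro hcon
    rcases List.take_eq_nil_iff.mp hcon with h | h
    · omega
    · simp at h
  have hv : v ≠ [] := by
    rw [hv_def]; intro hcon
    have := List.drop_eq_nil_iff.mp hcon
    simp at this
  have hvlen : v.length = 1 := by
    simp only [hv_def, List.length_drop]; omega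
  obtain ⟨x, hx⟩ := List.length_eq_one_iff.mp hvlen
  have hxlast : x = (a :: t).getLast (by simp) := by
    have h1 : v.getLast hv = (a :: t).getLast (by simp) :=
      List.getLast_drop (by omega)
    have h2 : (a :: t).getLast (by simp) ∈ v := h1 ▸ List.getLast_mem hv
    rw [hx] at h2
    exact (List.mem_singleton.mp h2).symm
  have ha : a ∈ u := by
    rw [hu_def, show t.length = (t.length - 1) + 1 from by omega, List.take_succ_cons]
    exact List.mem_cons_self
  have e2 : a ≤ pvMx u := pv_le_pvMx u a ha
  have e1 : pvMx (a :: t) = max (pvMx u) (pvMx v) := by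
    have := pvMx_append u v hu hv
    rw [List.take_append_drop] at this; exact this
  have hmv : pvMx v = (a :: t).getLast (by simp) := by
    rw [hx, hxlast]; simp [pvMx_cons]
  have h6 : (a :: t).getLast (by simp) ≤ pvMx u := le_trans hge e2
  rw [pvAns, hsl1, hsl2, pv_abs_eq, e1, hmv]
  rw [max_eq_left h6, min_eq_right h6, min_eq_right hge]

-- B's closed form, spelled out for a nonempty list
theorem pv_alt_eq (a : Int) (t : List Int) (ht : t ≠ []) :
    maxAbs1_alt (a :: t) = pvMx (a :: t) - min a ((a :: t).getLast (by simp)) := by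
  have hlen : ¬ (a :: t).length ≤ 1 := by
    cases t with
    | nil => exact absurd rfl ht
    | cons _ _ => simp
  rw [maxAbs1_alt, if_neg hlen]
  rw [show PySem.List.pyGetD (a :: t) 0 0 = a from PySem.List.pyGetD_zero_cons _ _ _]
  rw [PySem.List.pyGetD_neg_one (a :: t) 0 (by simp)]
  rfl

-- the main case: length ≥ 3
theorem pv_big (a : Int) (t : List Int) (h2 : 2 ≤ t.length) :
    maxAbs1 (a :: t) = maxAbs1_alt (a :: t) := by
  have ht : t ≠ [] := by intro h; rw [h] at h2; simp at h2
  have hlen : (a :: t).length = t.length + 1 := by simp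
  have hn1 : ¬ (a :: t).length ≤ 1 := by omega
  have hn2 : ¬ (a :: t).length = 2 := by omega
  rw [maxAbs1, if_neg hn1, if_neg hn2]
  rw [PySem.List.pyRange_one_cons (by omega)]
  rw [maxAbs1Loop_none, maxAbs1Loop_eq, Option.getD_some]
  rw [show (1 : Int) + 1 = 2 from by norm_num]
  obtain ⟨hmem, hlo, hub⟩ :=
    pv_foldl_char (pvAns (a :: t)) (PySem.List.pyRange 2 ((a :: t).length : Int) 1)
      (pvAns (a :: t) 1)
  set R := (PySem.List.pyRange 2 ((a :: t).length : Int) 1).foldl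
    (fun r i => max (pvAns (a :: t) i) r) (pvAns (a :: t) 1) with hR_def
  rw [pv_alt_eq a t ht]
  set T := pvMx (a :: t) - min a ((a :: t).getLast (by simp)) with hT_def
  have hRT : R ≤ T := by
    rcases hmem with h | ⟨i, hi, hh⟩
    · rw [h]; exact pv_bound a t 1 le_rfl (by omega)
    · rw [hh]
      obtain ⟨hi1, hi2⟩ := (PySem.List.mem_pyRange_one).mp hi
      exact pv_bound a t i (by omega) hi2
  have hTR : T ≤ R := by
    rcases le_total a ((a :: t).getLast (by simp)) with hc | hc
    · rw [hT_def, ← pv_att_low a t ht hc]; exact hlo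
    · rw [hT_def, ← pv_att_high a t ht hc]
      exact hub _ ((PySem.List.mem_pyRange_one).mpr ⟨by omega, by omega⟩)
  omega

theorem pv_main : ∀ (arr : List Int), maxAbs1 arr = maxAbs1_alt arr := by
  intro arr
  match arr with
  | [] => rfl
  | [x] => rfl
  | [x, y] =>
    rw [maxAbs1, maxAbs1_alt]
    norm_num
    rw [show PySem.List.pyGetD [x, y] 1 0 = y from rfl,
        show PySem.List.pyGetD [x, y] (-1) 0 = y from rfl,
        show (PySem.List.max? [x, y] (fun y => y)).getD 0 = max x y from by
          simp [PySem.List.max?_id_cons]]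
    exact pv_abs_eq x y
  | a :: b :: c :: t => exact pv_big a (b :: c :: t) (by simp)

-- ===== VERDICT (by name: the statement is the Claim_ definition above) =====
theorem maxAbs1_spec : Claim_equal_maxAbs1 := by
  intro arr _
  exact pv_main arr
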